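-- pv_equiv track=rewrite | github.com/cielavenir/checkio | scientific-expedition/berserk-rook.py | solve
-- ===== SOURCE A (Python) =====
-- def solve(head,enemy):
-- 	try:
-- 		return max(
-- 			solve(enemy[i],enemy[:i]+enemy[i+1:])+1
-- 			for i in range(len(enemy)) if any(
-- 				enemy[i][n]==head[n] and
-- 				not any(
-- 					enemy[j][n]==head[n] and (head[n^1]<enemy[j][n^1]<enemy[i][n^1] or enemy[i][n^1]<enemy[j][n^1]<head[n^1])
-- 					for j in range(len(enemy))
-- 				)
-- 				for n in (0,1)
-- 			)
-- 		)
-- 	except ValueError: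
-- 		return 0
-- ===== SOURCE B (Python) =====
-- def solve(head, enemy):
--     # Memoized DP: since removing elements by slicing preserves relative order,
--     # every remaining-enemies list is a subsequence of the original, so the state
--     # (current square, remaining tuple) recurs across capture orders and caching pays off.
--     memo = {}
--
--     def reachable(h, rest, i):
--         for n in (0, 1):
--             if rest[i][n] == h[n] and not any(
--                 rest[j][n] == h[n] and (h[n ^ 1] < rest[j][n ^ 1] < rest[i][n ^ 1]
--                                         or rest[i][n ^ 1] < rest[j][n ^ 1] < h[n ^ 1])
--                 for j in range(len(rest))
--             ):
--                 return True
--         return False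
--
--     def rec(h, rest):
--         key = (h, rest)
--         if key in memo:
--             return memo[key]
--         best = 0
--         for i in range(len(rest)):
--             if reachable(h, rest, i):
--                 v = rec(rest[i], rest[:i] + rest[i + 1:]) + 1
--                 if v > best:
--                     best = v
--         memo[key] = best
--         return best
--
--     return rec(tuple(head), tuple(map(tuple, enemy)))
-- ===== Notes on version B (the rewrite author's own statement) =====
-- stated objective: faster
-- what changed: Top-down memoization keyed by (current square, remaining-enemies tuple) with a running-max accumulator replaces A's naive exponential recursion over all capture orders; since slicing preserves relative order, states recur across orders and the recursion becomes DP over subsets.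
import Mathlib
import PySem

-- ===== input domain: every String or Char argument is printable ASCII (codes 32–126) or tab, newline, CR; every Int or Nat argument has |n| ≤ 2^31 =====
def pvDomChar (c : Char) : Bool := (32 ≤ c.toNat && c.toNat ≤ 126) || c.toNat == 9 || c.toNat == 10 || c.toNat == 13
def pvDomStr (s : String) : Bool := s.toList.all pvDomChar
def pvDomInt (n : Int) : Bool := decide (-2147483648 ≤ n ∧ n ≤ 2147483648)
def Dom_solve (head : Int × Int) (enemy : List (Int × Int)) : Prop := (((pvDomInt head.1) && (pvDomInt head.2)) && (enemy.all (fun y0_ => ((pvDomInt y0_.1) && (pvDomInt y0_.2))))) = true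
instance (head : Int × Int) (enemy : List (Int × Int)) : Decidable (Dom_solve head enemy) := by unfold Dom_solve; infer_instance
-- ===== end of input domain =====

-- B replaces A's naive exponential recursion with top-down memoization keyed by
-- (current square, remaining-enemies list) and a running-max accumulator (return value only).
-- Both ports use fuel (> length of the enemy list, which strictly shrinks) purely as a
-- structural totality guard; the fuel-0 branch is never reached from the entry points.

-- shared helper: both Pythons use the textually identical reachability test
-- (enemy[i] on head's row/column, with no remaining piece strictly between)
def pj (p : Int × Int) (n : Nat) : Int := if n == 0 then p.1 else p.2

def reach (h : Int × Int) (rest : List (Int × Int)) (e : Int × Int) : Bool :=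
  [0, 1].any (fun n =>
    (pj e n == pj h n) &&
    !(rest.any (fun ej =>
      (pj ej n == pj h n) &&
      ((decide (pj h (n ^^^ 1) < pj ej (n ^^^ 1)) && decide (pj ej (n ^^^ 1) < pj e (n ^^^ 1))) ||
       (decide (pj e (n ^^^ 1) < pj ej (n ^^^ 1)) && decide (pj ej (n ^^^ 1) < pj h (n ^^^ 1)))))))

-- ===== PORT A =====
-- the generator 'solve(enemy[i], enemy[:i]+enemy[i+1:])+1 for i in range(len(enemy)) if <reach>':
-- i walks the index range while e walks the list, so e = enemy[i]
def candsF (rec : (Int × Int) → List (Int × Int) → Int) (head : Int × Int)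
    (enemy : List (Int × Int)) : Nat → List (Int × Int) → List Int
  | _, [] => []
  | i, e :: tl =>
    (if reach head enemy e then
      [rec e (PySem.List.slice enemy none (some (i : Int)) ++ PySem.List.slice enemy (some ((i : Int) + 1)) none) + 1]
    else []) ++ candsF rec head enemy (i + 1) tl

-- max(gen) with 'except ValueError: return 0' → max? of the candidate list, 0 when empty
def solveF : Nat → (Int × Int) → List (Int × Int) → Int
  | 0, _, _ => 0
  | fuel + 1, head, enemy =>
    match PySem.List.max? (candsF (solveF fuel) head enemy 0 enemy) (fun x => x) with
    | none => 0
    | some v => v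

def solve (head : Int × Int) (enemy : List (Int × Int)) : Int :=
  solveF (enemy.length + 1) head enemy

-- ===== PORT B =====
-- 'for i in range(len(rest))' with running max 'best', threading the memo dict;
-- rest[:i] + rest[i+1:] with 0 ≤ i < len rest is exactly take/drop
def loopBF (rec : (Int × Int) → List (Int × Int) → PySem.Dict ((Int × Int) × List (Int × Int)) Int →
      Int × PySem.Dict ((Int × Int) × List (Int × Int)) Int)
    (h : Int × Int) (rest : List (Int × Int)) :
    Nat → Int → List (Int × Int) → PySem.Dict ((Int × Int) × List (Int × Int)) Int →
      Int × PySem.Dict ((Int × Int) × List (Int × Int)) Int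
  | _, best, [], memo => (best, memo)
  | i, best, e :: tl, memo =>
    if reach h rest e then
      let r := rec e (rest.take i ++ rest.drop (i + 1)) memo
      let v := r.1 + 1
      loopBF rec h rest (i + 1) (if v > best then v else best) tl r.2
    else
      loopBF rec h rest (i + 1) best tl memo

def recBF : Nat → (Int × Int) → List (Int × Int) →
    PySem.Dict ((Int × Int) × List (Int × Int)) Int →
      Int × PySem.Dict ((Int × Int) × List (Int × Int)) Int
  | 0, _, _, memo => (0, memo)
  | fuel + 1, h, rest, memo =>
    match memo.get? (h, rest) with
    | some v => (v, memo)
    | none =>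
      let r := loopBF (recBF fuel) h rest 0 0 rest memo
      (r.1, r.2.insert (h, rest) r.1)

def solve_alt (head : Int × Int) (enemy : List (Int × Int)) : Int :=
  (recBF (enemy.length + 1) head enemy PySem.Dict.empty).1

-- ===== PRECONDITION & SPEC =====
def Spec_solve (head : Int × Int) (enemy : List (Int × Int)) (out : Int) : Prop := out = solve_alt head enemy
instance (head : Int × Int) (enemy : List (Int × Int)) (out : Int) : Decidable (Spec_solve head enemy out) := by unfold Spec_solve; infer_instance

-- ===== CLAIM (what is proved, stated in full; the proofs are below) =====
def Claim_equal_solve : Prop := ∀ (head : Int × Int) (enemy : List (Int × Int)), Dom_solve head enemy → Spec_solve head enemy (solve head enemy)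

-- ===== LEMMAS AND PROOFS =====

theorem pv_removed_eq (enemy : List (Int × Int)) (i : Nat) :
    PySem.List.slice enemy none (some (i : Int)) ++ PySem.List.slice enemy (some ((i : Int) + 1)) none
      = enemy.take i ++ enemy.drop (i + 1) := by
  have h1 : ((i : Int) + 1) = ((i + 1 : Nat) : Int) := by push_cast; ring
  rw [PySem.List.slice_to_natCast, h1, PySem.List.slice_from_natCast]

theorem pv_removed_len (enemy : List (Int × Int)) (i : Nat) (h : i < enemy.length) :
    (enemy.take i ++ enemy.drop (i + 1)).length = enemy.length - 1 := by
  simp [List.length_take, List.length_drop]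
  omega

-- every memo entry records the naive value
def Good (memo : PySem.Dict ((Int × Int) × List (Int × Int)) Int) : Prop :=
  ∀ k v, memo.get? k = some v → v = solve k.1 k.2

theorem mem_candsF (rec : (Int × Int) → List (Int × Int) → Int) (head : Int × Int)
    (enemy : List (Int × Int)) :
    ∀ (tl : List (Int × Int)) (i : Nat) (x : Int), x ∈ candsF rec head enemy i tl →
      ∃ y l, x = rec y l + 1 := by
  intro tl
  induction tl with
  | nil => intro i x hx; simp [candsF] at hx
  | cons e tl ih =>
    intro i x hx
    rw [candsF] at hx
    rcases List.mem_append.1 hx with hx1 | hx2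
    · split at hx1
      · simp only [List.mem_singleton] at hx1
        exact ⟨_, _, hx1⟩
      · simp at hx1
    · exact ih (i + 1) x hx2

theorem solveF_nonneg : ∀ (fuel : Nat) (h : Int × Int) (e : List (Int × Int)),
    0 ≤ solveF fuel h e := by
  intro fuel
  induction fuel with
  | zero => intro h e; rw [solveF]
  | succ fuel ih =>
    intro h e
    rw [solveF]
    cases hm : PySem.List.max? (candsF (solveF fuel) h e 0 e) (fun x => x) with
    | none => simp
    | some v =>
      simp only []
      obtain ⟨y, l, hx⟩ := mem_candsF (solveF fuel) h e e 0 v (PySem.List.max?_mem hm)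
      have := ih y l
      omega

theorem candsF_congr (rec rec' : (Int × Int) → List (Int × Int) → Int) (head : Int × Int)
    (enemy : List (Int × Int))
    (hrr : ∀ (y : Int × Int) (i : Nat), i < enemy.length →
      rec y (enemy.take i ++ enemy.drop (i + 1)) = rec' y (enemy.take i ++ enemy.drop (i + 1))) :
    ∀ (tl : List (Int × Int)) (i : Nat), i + tl.length ≤ enemy.length →
      candsF rec head enemy i tl = candsF rec' head enemy i tl := by
  intro tl
  induction tl with
  | nil => intro i _; rw [candsF, candsF]
  | cons e tl ih =>
    intro i hle
    simp only [List.length_cons] at hle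
    rw [candsF, candsF, pv_removed_eq, ih (i + 1) (by omega)]
    congr 1
    split
    · rw [hrr e i (by omega)]
    · rfl

theorem solveF_irrel : ∀ (m : Nat) (e : List (Int × Int)), e.length ≤ m →
    ∀ (f f' : Nat) (h : Int × Int), e.length < f → e.length < f' →
      solveF f h e = solveF f' h e := by
  intro m
  induction m with
  | zero =>
    intro e hle f f' h hf hf'
    obtain ⟨a, rfl⟩ : ∃ a, f = a + 1 := ⟨f - 1, by omega⟩
    obtain ⟨b, rfl⟩ : ∃ b, f' = b + 1 := ⟨f' - 1, by omega⟩
    have he : e = [] := List.length_eq_zero_iff.1 (by omega)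
    subst he
    simp [solveF, candsF]
  | succ m ih =>
    intro e hle f f' h hf hf'
    obtain ⟨a, rfl⟩ : ∃ a, f = a + 1 := ⟨f - 1, by omega⟩
    obtain ⟨b, rfl⟩ : ∃ b, f' = b + 1 := ⟨f' - 1, by omega⟩
    rw [solveF, solveF,
      candsF_congr (solveF a) (solveF b) h e
        (by
          intro y i hi
          have hl := pv_removed_len e i hi
          exact ih _ (by omega) a b y (by omega) (by omega))
        e 0 (by omega)]

theorem solve_eq_solveF (h : Int × Int) (e : List (Int × Int)) (f : Nat) (hf : e.length < f) :
    solve h e = solveF f h e :=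
  solveF_irrel e.length e le_rfl (e.length + 1) f h (by omega) hf

theorem candsF_pos (f : Nat) (head : Int × Int) (enemy : List (Int × Int))
    (tl : List (Int × Int)) (i : Nat) :
    ∀ x ∈ candsF (solveF f) head enemy i tl, 1 ≤ x := by
  intro x hx
  obtain ⟨y, l, hx⟩ := mem_candsF (solveF f) head enemy tl i x hx
  have := solveF_nonneg f y l
  omega

theorem foldl_if_max (t : List Int) : ∀ b : Int,
    t.foldl (fun b v => if v > b then v else b) b = t.foldl max b := by
  induction t with
  | nil => intro b; rfl
  | cons x t ih =>
    intro b
    simp only [List.foldl_cons]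
    rw [ih]
    congr 1
    split <;> omega

theorem foldl_max_eq (l : List Int) (hl : ∀ x ∈ l, 1 ≤ x) :
    l.foldl (fun b v => if v > b then v else b) 0
      = (match PySem.List.max? l (fun x => x) with | none => 0 | some v => v) := by
  cases l with
  | nil => rfl
  | cons x t =>
    rw [PySem.List.max?_id_cons]
    simp only [List.foldl_cons]
    have hx : (if x > 0 then x else 0) = x := by
      have := hl x (by simp)
      split <;> omega
    rw [hx, foldl_if_max]

-- the loop computes the running max of A's candidate list, preserving memo correctness
theorem loopBF_spec
    (rec : (Int × Int) → List (Int × Int) → PySem.Dict ((Int × Int) × List (Int × Int)) Int →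
      Int × PySem.Dict ((Int × Int) × List (Int × Int)) Int)
    (h : Int × Int) (rest : List (Int × Int))
    (hIH : ∀ (y : Int × Int) (i : Nat), i < rest.length → ∀ memo, Good memo →
      (rec y (rest.take i ++ rest.drop (i + 1)) memo).1 = solve y (rest.take i ++ rest.drop (i + 1))
        ∧ Good (rec y (rest.take i ++ rest.drop (i + 1)) memo).2) :
    ∀ (tl : List (Int × Int)) (i : Nat) (best : Int) memo, i + tl.length ≤ rest.length →
      Good memo →
      (loopBF rec h rest i best tl memo).1
          = (candsF (fun y l => solve y l) h rest i tl).foldl (fun b v => if v > b then v else b) best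
        ∧ Good (loopBF rec h rest i best tl memo).2 := by
  intro tl
  induction tl with
  | nil =>
    intro i best memo _ hg
    rw [loopBF, candsF]
    exact ⟨rfl, hg⟩
  | cons e tl ih =>
    intro i best memo hle hg
    simp only [List.length_cons] at hle
    rw [loopBF, candsF, pv_removed_eq]
    by_cases hr : reach h rest e
    · rw [if_pos hr, if_pos hr]
      obtain ⟨h1, h2⟩ := hIH e i (by omega) memo hg
      simp only []
      rw [List.singleton_append, List.foldl_cons, h1]
      exact ih (i + 1) _ _ (by omega) h2
    · rw [if_neg hr, if_neg hr]
      simp only [List.nil_append]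
      exact ih (i + 1) best memo (by omega) hg

theorem recBF_step (f : Nat) (rest : List (Int × Int)) (_hf : rest.length ≤ f)
    (IH : ∀ (rest' : List (Int × Int)), rest'.length < rest.length →
      ∀ (h : Int × Int) memo, Good memo →
        (recBF f h rest' memo).1 = solve h rest' ∧ Good (recBF f h rest' memo).2)
    (h : Int × Int) (memo : PySem.Dict ((Int × Int) × List (Int × Int)) Int) (hg : Good memo) :
    (recBF (f + 1) h rest memo).1 = solve h rest ∧ Good (recBF (f + 1) h rest memo).2 := by
  rw [recBF]
  cases hmk : memo.get? (h, rest) with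
  | some v =>
    exact ⟨hg (h, rest) v hmk, hg⟩
  | none =>
    have hIH : ∀ (y : Int × Int) (i : Nat), i < rest.length → ∀ memo', Good memo' →
        (recBF f y (rest.take i ++ rest.drop (i + 1)) memo').1
            = solve y (rest.take i ++ rest.drop (i + 1))
          ∧ Good (recBF f y (rest.take i ++ rest.drop (i + 1)) memo').2 := by
      intro y i hi memo' hg'
      exact IH _ (by rw [pv_removed_len rest i hi]; omega) y memo' hg'
    obtain ⟨h1, h2⟩ := loopBF_spec (recBF f) h rest hIH rest 0 0 memo (by omega) hg
    have hcands : candsF (fun y l => solve y l) h rest 0 rest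
        = candsF (solveF rest.length) h rest 0 rest := by
      apply candsF_congr _ _ h rest _ rest 0 (by omega)
      intro y i hi
      have hl := pv_removed_len rest i hi
      exact solve_eq_solveF y _ rest.length (by omega)
    have hpos : ∀ x ∈ candsF (fun y l => solve y l) h rest 0 rest, 1 ≤ x := by
      rw [hcands]; exact candsF_pos rest.length h rest rest 0
    have hval : (loopBF (recBF f) h rest 0 0 rest memo).1 = solve h rest := by
      rw [h1, foldl_max_eq _ hpos, hcands]
      rw [solve_eq_solveF h rest (rest.length + 1) (by omega), solveF]
    simp only []
    refine ⟨hval, ?_⟩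
    intro k v hk
    rw [PySem.Dict.get?_insert] at hk
    split at hk
    · rename_i hkk
      subst hkk
      cases hk
      exact hval
    · exact h2 k v hk

theorem recBF_good : ∀ (m f : Nat) (rest : List (Int × Int)), rest.length ≤ m →
    rest.length ≤ f → ∀ (h : Int × Int) memo, Good memo →
      (recBF (f + 1) h rest memo).1 = solve h rest ∧ Good (recBF (f + 1) h rest memo).2 := by
  intro m
  induction m with
  | zero =>
    intro f rest hm hf h memo hg
    exact recBF_step f rest hf (fun rest' hlt => absurd hlt (by omega)) h memo hg
  | succ m ih =>
    intro f rest hm hf h memo hg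
    refine recBF_step f rest hf ?_ h memo hg
    intro rest' hlt h' memo' hg'
    obtain ⟨a, rfl⟩ : ∃ a, f = a + 1 := ⟨f - 1, by omega⟩
    exact ih a rest' (by omega) (by omega) h' memo' hg'

-- ===== VERDICT (by name: the statement is the Claim_ definition above) =====
theorem solve_spec : Claim_equal_solve := by
  intro head enemy _
  unfold Spec_solve solve_alt
  have := (recBF_good enemy.length enemy.length enemy le_rfl le_rfl head PySem.Dict.empty
    (by intro k v hv; simp [PySem.Dict.get?_empty] at hv)).1
  exact this.symm
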